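-- pv_equiv track=rewrite | github.com/quarkquarkquarkquark/cs336-spring2025-assignment1-solution | tests/adapters.py | replace_pair
-- ===== SOURCE A (Python) =====
-- def replace_pair(lst, pair, new_val):
--     a, b = pair
--     res=[]
--     i=0
--     while i<len(lst):
--         if i!=len(lst)-1 and lst[i]==pair[0] and lst[i+1]==pair[1]:
--             res.append(new_val)
--             i+=2
--             continue
--
--         res.append(lst[i])
--         i+=1
--     return res
-- ===== SOURCE B (Python) =====
-- def replace_pair(lst, pair, new_val):
--     a, b = pair
--     res = []
--     pending = None
--     has_pending = False
--     for x in lst: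
--         if has_pending and x == b:
--             res.append(new_val)
--             has_pending = False
--         else:
--             if has_pending:
--                 res.append(pending)
--                 has_pending = False
--             if x == a:
--                 pending = x
--                 has_pending = True
--             else:
--                 res.append(x)
--     if has_pending:
--         res.append(pending)
--     return res
-- ===== Notes on version B (the rewrite author's own statement) =====
-- stated objective: alternative
-- what changed: Replaced the index-based while loop with i+=2 lookahead by a single forward-pass state machine that keeps one 'pending' slot for an unmatched pair[0] element and flushes it when the next element fails to complete the pair.
import Mathlib
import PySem

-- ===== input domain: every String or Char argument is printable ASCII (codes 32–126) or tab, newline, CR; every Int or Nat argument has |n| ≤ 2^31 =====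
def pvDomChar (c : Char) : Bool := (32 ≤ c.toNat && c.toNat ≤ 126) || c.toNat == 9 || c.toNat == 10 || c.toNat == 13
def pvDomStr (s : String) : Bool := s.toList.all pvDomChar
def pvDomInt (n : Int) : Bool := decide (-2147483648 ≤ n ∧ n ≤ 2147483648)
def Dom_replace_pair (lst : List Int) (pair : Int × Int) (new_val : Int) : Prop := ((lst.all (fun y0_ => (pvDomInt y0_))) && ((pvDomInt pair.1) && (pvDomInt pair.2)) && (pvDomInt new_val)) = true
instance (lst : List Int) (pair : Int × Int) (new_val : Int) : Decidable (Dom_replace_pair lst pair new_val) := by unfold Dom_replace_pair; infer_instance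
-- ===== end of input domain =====

-- B replaces A's index-based lookahead loop (i += 2 on a match) with a single-pass
-- state machine carrying a 'pending' unmatched pair[0] element; same result, same cost.


-- ===== PORT A =====
-- A's while loop over index i: at each step it looks ahead one element
-- (guarded by i != len-1); on a match it emits new_val and skips two,
-- otherwise it emits lst[i] and advances one. Transcribed as structural
-- recursion on the remaining suffix (the lookahead guard is the two-element pattern).
def replace_pair_goA (a b new_val : Int) : List Int → List Int
  | [] => []
  | [x] => [x]
  | x :: y :: rest =>
    if x = a ∧ y = b then new_val :: replace_pair_goA a b new_val rest
    else x :: replace_pair_goA a b new_val (y :: rest)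
termination_by l => l.length

def replace_pair (lst : List Int) (pair : Int × Int) (new_val : Int) : List Int :=
  replace_pair_goA pair.1 pair.2 new_val lst

-- ===== PORT B =====
-- B's for loop with the 'pending' slot (Option Int = pending/has_pending).
def replace_pair_goB (a b new_val : Int) (pending : Option Int) : List Int → List Int
  | [] =>
    match pending with
    | some p => [p]
    | none => []
  | x :: rest =>
    match pending with
    | some p =>
      if x = b then new_val :: replace_pair_goB a b new_val none rest
      else
        p :: (if x = a then replace_pair_goB a b new_val (some x) rest
              else x :: replace_pair_goB a b new_val none rest)
    | none =>
      if x = a then replace_pair_goB a b new_val (some x) rest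
      else x :: replace_pair_goB a b new_val none rest

def replace_pair_alt (lst : List Int) (pair : Int × Int) (new_val : Int) : List Int :=
  replace_pair_goB pair.1 pair.2 new_val none lst

-- ===== PRECONDITION & SPEC =====
def Spec_replace_pair (lst : List Int) (pair : Int × Int) (new_val : Int) (out : List Int) : Prop := out = replace_pair_alt lst pair new_val
instance (lst : List Int) (pair : Int × Int) (new_val : Int) (out : List Int) : Decidable (Spec_replace_pair lst pair new_val out) := by unfold Spec_replace_pair; infer_instance

-- ===== CLAIM (what is proved, stated in full; the proofs are below) =====
def Claim_equal_replace_pair : Prop := ∀ (lst : List Int) (pair : Int × Int) (new_val : Int), Dom_replace_pair lst pair new_val → Spec_replace_pair lst pair new_val (replace_pair lst pair new_val)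

-- ===== LEMMAS AND PROOFS =====
theorem replace_pair_agree (a b new_val : Int) :
    ∀ lst : List Int, replace_pair_goA a b new_val lst = replace_pair_goB a b new_val none lst
  | [] => by simp [replace_pair_goA, replace_pair_goB]
  | [x] => by by_cases hx : x = a <;> simp [replace_pair_goA, replace_pair_goB, hx]
  | x :: y :: rest => by
    by_cases hx : x = a
    · by_cases hy : y = b
      · simp [replace_pair_goA, replace_pair_goB, hx, hy,
          replace_pair_agree a b new_val rest]
      · have hrec := replace_pair_agree a b new_val (y :: rest)
        simp [replace_pair_goA, replace_pair_goB, hx, hy] at hrec ⊢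
        rw [hrec]
    · have hrec := replace_pair_agree a b new_val (y :: rest)
      simp [replace_pair_goA, replace_pair_goB, hx, hrec]
termination_by l => l.length

-- ===== VERDICT (by name: the statement is the Claim_ definition above) =====
theorem replace_pair_spec : Claim_equal_replace_pair := by
  intro lst pair new_val _
  unfold Spec_replace_pair replace_pair replace_pair_alt
  exact replace_pair_agree pair.1 pair.2 new_val lst
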